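-- pv_equiv track=rewrite | github.com/nickneuer/makin-wavs | freq_writer.py | normalize_freqs
-- ===== SOURCE A (Python) =====
-- def normalize_freqs(freqs, threshold):
--     ordered = sorted(freqs)
--     val = ordered[0]
--     freq_lu = {}
--     for freq in ordered:
--         if freq - val < threshold:
--             freq_lu[freq] = val
--         else:
--             val = freq
--             freq_lu[freq] = val
--     return map(lambda f: freq_lu[f], freqs)
-- ===== SOURCE B (Python) =====
-- def normalize_freqs(freqs, threshold):
--     # Boundary-list + binary search instead of a full per-frequency dict.
--     ordered = sorted(freqs)
--     reps = [ordered[0]]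
--     for freq in ordered:
--         if freq - reps[-1] >= threshold:
--             reps.append(freq)
--
--     def rep_of(f):
--         lo, hi = 0, len(reps)
--         while lo < hi:
--             mid = (lo + hi) // 2
--             if reps[mid] <= f:
--                 lo = mid + 1
--             else:
--                 hi = mid
--         return reps[lo - 1]
--
--     return map(rep_of, freqs)
-- ===== Notes on version B (the rewrite author's own statement) =====
-- stated objective: alternative
-- what changed: Instead of building a dict mapping every frequency to its representative, B builds only the increasing list of cluster-start boundaries in one pass over the sorted list and resolves each frequency by a hand-rolled binary search over that boundary list.
import Mathlib
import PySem

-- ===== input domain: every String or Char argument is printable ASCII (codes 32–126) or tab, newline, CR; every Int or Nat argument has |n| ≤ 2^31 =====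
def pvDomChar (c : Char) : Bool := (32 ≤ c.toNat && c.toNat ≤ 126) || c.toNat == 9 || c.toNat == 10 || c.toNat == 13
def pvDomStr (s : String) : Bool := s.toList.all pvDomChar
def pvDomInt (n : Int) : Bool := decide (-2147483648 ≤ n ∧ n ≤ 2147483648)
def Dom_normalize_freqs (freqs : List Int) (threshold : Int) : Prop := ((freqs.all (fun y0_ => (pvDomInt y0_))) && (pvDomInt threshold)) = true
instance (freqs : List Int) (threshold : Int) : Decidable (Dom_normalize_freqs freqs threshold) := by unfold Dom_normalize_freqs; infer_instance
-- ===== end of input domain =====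

-- B replaces A's per-frequency dict by a cluster-boundary list plus binary-search lookup (alternative decomposition, same results).


-- ===== PORT A =====
def normalize_freqs (freqs : List Int) (threshold : Int) : List Int :=
  let ordered := PySem.List.sorted freqs (fun x => x) false
  let v0 := PySem.List.pyGetD ordered 0 0  -- ordered[0]; the IndexError on empty input is excluded by Pre_
  let st := ordered.foldl
    (fun (s : Int × PySem.Dict Int Int) freq =>
      if freq - s.1 < threshold then (s.1, s.2.insert freq s.1)
      else (freq, s.2.insert freq freq))
    (v0, PySem.Dict.empty)
  -- freq_lu[f]: every f ∈ freqs is a key of the dict built over sorted(freqs), so get? is never none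
  freqs.map (fun f => (st.2.get? f).getD 0)

-- ===== PORT B =====
-- hand-rolled bisect_right loop of Source B: while lo < hi: mid=(lo+hi)//2; if reps[mid] <= f: lo=mid+1 else: hi=mid
def pvBsLoop (reps : List Int) (f lo hi : Int) : Int :=
  if h : lo < hi then
    let mid := PySem.Int.floordiv (lo + hi) 2
    if (PySem.List.pyGet? reps mid).getD 0 ≤ f then pvBsLoop reps f (mid + 1) hi
    else pvBsLoop reps f lo mid
  else lo
termination_by (hi - lo).toNat
decreasing_by
  all_goals
    have h1 : lo * 2 ≤ lo + hi := by omega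
    have h2 : lo + hi < hi * 2 := by omega
    have hl : lo ≤ PySem.Int.floordiv (lo + hi) 2 :=
      (PySem.Int.le_floordiv_iff_mul_le (by norm_num)).mpr h1
    have hr : PySem.Int.floordiv (lo + hi) 2 < hi :=
      (PySem.Int.floordiv_lt_iff_lt_mul (by norm_num)).mpr h2
    simp only [mid] at *
    omega

-- rep_of of Source B: binary search, then reps[lo - 1] (lo - 1 = -1 indexes from the end, as in Python)
def pvRepOf (reps : List Int) (f : Int) : Int :=
  let lo := pvBsLoop reps f 0 (reps.length : Int)
  (PySem.List.pyGet? reps (lo - 1)).getD 0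

def normalize_freqs_alt (freqs : List Int) (threshold : Int) : List Int :=
  let ordered := PySem.List.sorted freqs (fun x => x) false
  let r0 := PySem.List.pyGetD ordered 0 0  -- ordered[0]; the IndexError on empty input is excluded by Pre_
  let reps := ordered.foldl
    (fun reps freq =>
      if threshold ≤ freq - (PySem.List.pyGet? reps (-1)).getD 0 then reps ++ [freq]
      else reps)
    [r0]
  freqs.map (fun f => pvRepOf reps f)

-- ===== PRECONDITION & SPEC =====
-- Pre_ excludes only the empty list, on which both Pythons raise IndexError at ordered[0].
def Pre_normalize_freqs (freqs : List Int) (threshold : Int) : Prop := freqs ≠ []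
instance (freqs : List Int) (threshold : Int) : Decidable (Pre_normalize_freqs freqs threshold) := by unfold Pre_normalize_freqs; infer_instance
def pvWitness_normalize_freqs : List Int × Int := ([3, 1, 4, 1, 10], 3)

def Spec_normalize_freqs (freqs : List Int) (threshold : Int) (out : List Int) : Prop := out = normalize_freqs_alt freqs threshold
instance (freqs : List Int) (threshold : Int) (out : List Int) : Decidable (Spec_normalize_freqs freqs threshold out) := by unfold Spec_normalize_freqs; infer_instance

-- ===== CLAIM (what is proved, stated in full; the proofs are below) =====
def Claim_equal_normalize_freqs : Prop := ∀ (freqs : List Int) (threshold : Int), Dom_normalize_freqs freqs threshold → Pre_normalize_freqs freqs threshold → Spec_normalize_freqs freqs threshold (normalize_freqs freqs threshold)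

-- ===== LEMMAS AND PROOFS =====

-- binary-search invariant: pvBsLoop returns the split point L with reps[i] ≤ f for i < L and f < reps[i] for i ≥ L
theorem pvBsLoop_spec (reps : List Int) (f : Int) (hs : reps.Pairwise (· ≤ ·)) :
    ∀ (n : Nat) (lo hi : Int), (hi - lo).toNat = n → 0 ≤ lo → lo ≤ hi → hi ≤ (reps.length : Int) →
    (∀ (i : Nat) (h : i < reps.length), (i : Int) < lo → reps[i] ≤ f) →
    (∀ (i : Nat) (h : i < reps.length), hi ≤ (i : Int) → f < reps[i]) →
    (lo ≤ pvBsLoop reps f lo hi ∧ pvBsLoop reps f lo hi ≤ hi ∧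
     (∀ (i : Nat) (h : i < reps.length), (i : Int) < pvBsLoop reps f lo hi → reps[i] ≤ f) ∧
     (∀ (i : Nat) (h : i < reps.length), pvBsLoop reps f lo hi ≤ (i : Int) → f < reps[i])) := by
  intro n
  induction n using Nat.strong_induction_on with
  | _ n ih =>
    intro lo hi hn h0 hlh hhl hlo hhi
    rw [pvBsLoop]
    by_cases h : lo < hi
    · simp only [h, dif_pos]
      have h1 : lo * 2 ≤ lo + hi := by omega
      have h2 : lo + hi < hi * 2 := by omega
      have hl : lo ≤ PySem.Int.floordiv (lo + hi) 2 :=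
        (PySem.Int.le_floordiv_iff_mul_le (by norm_num)).mpr h1
      have hr : PySem.Int.floordiv (lo + hi) 2 < hi :=
        (PySem.Int.floordiv_lt_iff_lt_mul (by norm_num)).mpr h2
      set mid := PySem.Int.floordiv (lo + hi) 2 with hmid
      have hmlen : mid.toNat < reps.length := by omega
      have hget : (PySem.List.pyGet? reps mid).getD 0 = reps[mid.toNat] := by
        rw [PySem.List.pyGet?_eq_some_getElem reps (by omega) (by omega)]
        rfl
      rw [hget]
      have hmono : ∀ (i j : Nat) (hi' : i < reps.length) (hj : j < reps.length), i ≤ j → reps[i] ≤ reps[j] := by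
        intro i j hi' hj hij
        rcases Nat.lt_or_ge i j with h' | h'
        · exact List.pairwise_iff_getElem.mp hs i j hi' hj h'
        · have : i = j := by omega
          subst this; exact le_refl _
      by_cases hc : reps[mid.toNat] ≤ f
      · simp only [hc, if_pos]
        exact
          have := ih (hi - (mid + 1)).toNat (by omega) (mid + 1) hi rfl (by omega) (by omega) hhl
            (fun i h hi' => le_trans (hmono i mid.toNat h hmlen (by omega)) hc) hhi
          ⟨by omega, this.2.1, this.2.2.1, this.2.2.2⟩
      · simp only [hc, if_false]
        push Not at hc
        exact
          have := ih (mid - lo).toNat (by omega) lo mid rfl (by omega) (by omega) (by omega) hlo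
            (fun i h hi' => lt_of_lt_of_le hc (hmono mid.toNat i hmlen h (by omega)))
          ⟨this.1, by omega, this.2.2.1, this.2.2.2⟩
    · simp only [h]
      have : lo = hi := by omega
      subst this
      exact ⟨le_refl _, le_refl _, hlo, hhi⟩

-- uniqueness of the split point
theorem pvBs_uniq (reps : List Int) (f : Int) (L1 L2 : Int)
    (hb1 : 0 ≤ L1) (hb1' : L1 ≤ (reps.length : Int)) (hb2 : 0 ≤ L2) (hb2' : L2 ≤ (reps.length : Int))
    (p1 : ∀ (i : Nat) (h : i < reps.length), (i : Int) < L1 → reps[i] ≤ f)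
    (q1 : ∀ (i : Nat) (h : i < reps.length), L1 ≤ (i : Int) → f < reps[i])
    (p2 : ∀ (i : Nat) (h : i < reps.length), (i : Int) < L2 → reps[i] ≤ f)
    (q2 : ∀ (i : Nat) (h : i < reps.length), L2 ≤ (i : Int) → f < reps[i]) : L1 = L2 := by
  rcases lt_trichotomy L1 L2 with h | h | h
  · have h1 : L1.toNat < reps.length := by omega
    have := p2 L1.toNat h1 (by omega)
    have := q1 L1.toNat h1 (by omega)
    omega
  · exact h
  · have h1 : L2.toNat < reps.length := by omega
    have := p1 L2.toNat h1 (by omega)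
    have := q2 L2.toNat h1 (by omega)
    omega

-- if every boundary is ≤ f, the lookup returns the last boundary
theorem pvRepOf_all_le (reps : List Int) (f : Int) (hs : reps.Pairwise (· ≤ ·)) (hne : reps ≠ [])
    (hall : ∀ x ∈ reps, x ≤ f) : pvRepOf reps f = reps.getLast hne := by
  have hlen : 0 < reps.length := List.length_pos_iff.mpr hne
  obtain ⟨hL0, hL1, hp, hq⟩ := pvBsLoop_spec reps f hs ((reps.length : Int) - 0).toNat 0 (reps.length : Int)
    rfl le_rfl (by omega) le_rfl (by omega) (by intro i h hi; omega)
  set L := pvBsLoop reps f 0 (reps.length : Int) with hLdef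
  have hLlen : L = (reps.length : Int) := by
    by_contra hne'
    have h1 : L.toNat < reps.length := by omega
    have := hq L.toNat h1 (by omega)
    have := hall reps[L.toNat] (List.getElem_mem h1)
    omega
  show (PySem.List.pyGet? reps (pvBsLoop reps f 0 (reps.length : Int) - 1)).getD 0 = reps.getLast hne
  rw [← hLdef, hLlen]
  rw [PySem.List.pyGet?_eq_some_getElem reps (by omega) (by omega)]
  simp only [Option.getD_some]
  rw [List.getLast_eq_getElem]
  congr 1
  omega

-- appending a boundary strictly above f does not change f's lookup (given the first boundary is ≤ f)
theorem pvRepOf_append_gt (reps : List Int) (r f : Int) (hs : (reps ++ [r]).Pairwise (· ≤ ·))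
    (hne : reps ≠ []) (hhead : reps.head hne ≤ f) (hfr : f < r) :
    pvRepOf (reps ++ [r]) f = pvRepOf reps f := by
  have hlen : 0 < reps.length := List.length_pos_iff.mpr hne
  have hs' : reps.Pairwise (· ≤ ·) := (List.pairwise_append.mp hs).1
  obtain ⟨hL0, hL1, hp, hq⟩ := pvBsLoop_spec reps f hs' ((reps.length : Int) - 0).toNat 0 (reps.length : Int)
    rfl le_rfl (by omega) le_rfl (by omega) (by intro i h hi; omega)
  set L := pvBsLoop reps f 0 (reps.length : Int) with hLdef
  obtain ⟨hM0, hM1, hp', hq'⟩ := pvBsLoop_spec (reps ++ [r]) f hs (((reps ++ [r]).length : Int) - 0).toNat 0 ((reps ++ [r]).length : Int)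
    rfl le_rfl (by omega) le_rfl (by omega) (by intro i h hi; omega)
  set M := pvBsLoop (reps ++ [r]) f 0 ((reps ++ [r]).length : Int) with hMdef
  have hlen' : (reps ++ [r]).length = reps.length + 1 := by simp
  -- L satisfies the split-point properties for reps ++ [r]
  have hML : M = L := by
    apply pvBs_uniq (reps ++ [r]) f M L hM0 (by omega) (by omega) (by omega) hp' hq'
    · intro i h hi
      have hi' : i < reps.length := by omega
      rw [List.getElem_append_left hi']
      exact hp i hi' hi
    · intro i h hi
      by_cases hir : i < reps.length
      · rw [List.getElem_append_left hir]
        exact hq i hir hi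
      · have : i = reps.length := by omega
        subst this
        rw [List.getElem_append_right (le_refl _)]
        simpa using hfr
  -- 1 ≤ L since the first boundary is ≤ f
  have hL1' : 1 ≤ L := by
    by_contra hc
    have h0len : 0 < reps.length := hlen
    have hq0 := hq 0 h0len (by omega)
    have hh : reps.head hne = reps[0]'h0len := List.head_eq_getElem hne
    rw [hh] at hhead
    omega
  show (PySem.List.pyGet? (reps ++ [r]) (pvBsLoop (reps ++ [r]) f 0 (((reps ++ [r]).length : Int)) - 1)).getD 0
      = (PySem.List.pyGet? reps (pvBsLoop reps f 0 ((reps.length : Int)) - 1)).getD 0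
  rw [← hLdef, ← hMdef, hML]
  have h1 : (L - 1).toNat < reps.length := by omega
  rw [PySem.List.pyGet?_eq_some_getElem reps (by omega) (by omega)]
  rw [PySem.List.pyGet?_eq_some_getElem (reps ++ [r]) (by omega) (by omega)]
  simp only [Option.getD_some]
  rw [List.getElem_append_left h1]

-- the joint loop invariant of A's dict-building fold and B's boundary-building fold
theorem pv_main_inv (t o0 : Int) :
    ∀ (rest : List Int) (val : Int) (lu : PySem.Dict Int Int) (reps : List Int),
    reps ≠ [] →
    reps.Pairwise (· ≤ ·) →
    reps.head? = some o0 →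
    reps.getLast? = some val →
    (∀ x ∈ reps, x ≤ val) →
    rest.Pairwise (· ≤ ·) →
    (∀ e ∈ rest, val ≤ e) →
    (∀ f x, lu.get? f = some x → x = pvRepOf reps f ∧ (f - val < t ∨ f ≤ val) ∧ o0 ≤ f ∧ ∀ e ∈ rest, f ≤ e) →
    ((∀ f x, (rest.foldl (fun (s : Int × PySem.Dict Int Int) freq =>
        if freq - s.1 < t then (s.1, s.2.insert freq s.1)
        else (freq, s.2.insert freq freq)) (val, lu)).2.get? f = some x →
        x = pvRepOf (rest.foldl (fun reps freq =>
          if t ≤ freq - (PySem.List.pyGet? reps (-1)).getD 0 then reps ++ [freq]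
          else reps) reps) f) ∧
     (∀ f ∈ rest, ∃ x, (rest.foldl (fun (s : Int × PySem.Dict Int Int) freq =>
        if freq - s.1 < t then (s.1, s.2.insert freq s.1)
        else (freq, s.2.insert freq freq)) (val, lu)).2.get? f = some x) ∧
     (∀ f, (∃ x, lu.get? f = some x) → ∃ y, (rest.foldl (fun (s : Int × PySem.Dict Int Int) freq =>
        if freq - s.1 < t then (s.1, s.2.insert freq s.1)
        else (freq, s.2.insert freq freq)) (val, lu)).2.get? f = some y)) := by
  intro rest
  induction rest with
  | nil =>
    intro val lu reps h1 h2 h3 h4 h5 h6 h7 h8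
    simp only [List.foldl_nil]
    exact ⟨fun f x hx => (h8 f x hx).1, by simp, fun f hf => hf⟩
  | cons e rest ih =>
    intro val lu reps h1 h2 h3 h4 h5 h6 h7 h8
    have hgetlast : (PySem.List.pyGet? reps (-1)).getD 0 = val := by
      rw [PySem.List.pyGet?_neg_one, h4]; rfl
    have hval_e : val ≤ e := h7 e List.mem_cons_self
    have ho0mem : o0 ∈ reps := List.mem_of_mem_head? (by rw [h3]; rfl)
    have ho0val : o0 ≤ val := h5 o0 ho0mem
    have hlastval : reps.getLast h1 = val := by
      have h := List.getLast?_eq_some_getLast (l := reps) h1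
      rw [h] at h4; exact Option.some.inj h4
    have hheado0 : reps.head h1 = o0 := by
      have h := List.head?_eq_some_head (l := reps) h1
      rw [h] at h3; exact Option.some.inj h3
    have hrest_pw : rest.Pairwise (· ≤ ·) := (List.pairwise_cons.mp h6).2
    have he_rest : ∀ e' ∈ rest, e ≤ e' := (List.pairwise_cons.mp h6).1
    simp only [List.foldl_cons, hgetlast]
    by_cases hc : e - val < t
    · have hcb : ¬ (t ≤ e - val) := by omega
      simp only [hc, hcb, if_pos, if_false]
      have h8' : ∀ f x, (lu.insert e val).get? f = some x →
          x = pvRepOf reps f ∧ (f - val < t ∨ f ≤ val) ∧ o0 ≤ f ∧ ∀ e' ∈ rest, f ≤ e' := by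
        intro f x hx
        rw [PySem.Dict.get?_insert] at hx
        by_cases hfe : f = e
        · rw [if_pos hfe] at hx
          have hxv : x = val := (Option.some.inj hx).symm
          subst hfe hxv
          refine ⟨?_, Or.inl hc, le_trans ho0val hval_e, he_rest⟩
          rw [pvRepOf_all_le reps f h2 h1 (fun y hy => le_trans (h5 y hy) hval_e), hlastval]
        · rw [if_neg hfe] at hx
          obtain ⟨ha, hb, hcnd, hd⟩ := h8 f x hx
          exact ⟨ha, hb, hcnd, fun e' he' => hd e' (List.mem_cons_of_mem e he')⟩
      obtain ⟨P1, P2, P3⟩ := ih val (lu.insert e val) reps h1 h2 h3 h4 h5 hrest_pw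
        (fun e' he' => le_trans hval_e (he_rest e' he')) h8'
      refine ⟨P1, ?_, fun f hf => P3 f (by
        obtain ⟨x, hx⟩ := hf
        by_cases hfe : f = e
        · exact ⟨val, by rw [PySem.Dict.get?_insert, if_pos hfe]⟩
        · exact ⟨x, by rw [PySem.Dict.get?_insert, if_neg hfe]; exact hx⟩)⟩
      intro f hf
      rcases List.mem_cons.mp hf with hfe | hfr
      · rw [hfe]
        exact P3 e ⟨val, PySem.Dict.get?_insert_self lu e val⟩
      · exact P2 f hfr
    · have hcb : t ≤ e - val := by omega
      simp only [hc, hcb, if_pos, if_false]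
      have h1' : reps ++ [e] ≠ [] := by simp
      have h2' : (reps ++ [e]).Pairwise (· ≤ ·) := by
        rw [List.pairwise_append]
        exact ⟨h2, List.pairwise_singleton _ _,
          fun x hx y hy => by
            rw [List.mem_singleton] at hy
            subst hy
            exact le_trans (h5 x hx) hval_e⟩
      have h3' : (reps ++ [e]).head? = some o0 := by
        rw [List.head?_append_of_ne_nil _ h1]
        exact h3
      have h4' : (reps ++ [e]).getLast? = some e := List.getLast?_concat
      have h5' : ∀ x ∈ reps ++ [e], x ≤ e := by
        intro x hx
        rcases List.mem_append.mp hx with hx | hx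
        · exact le_trans (h5 x hx) hval_e
        · rw [List.mem_singleton] at hx; subst hx; exact le_refl _
      have h8' : ∀ f x, (lu.insert e e).get? f = some x →
          x = pvRepOf (reps ++ [e]) f ∧ (f - e < t ∨ f ≤ e) ∧ o0 ≤ f ∧ ∀ e' ∈ rest, f ≤ e' := by
        intro f x hx
        rw [PySem.Dict.get?_insert] at hx
        by_cases hfe : f = e
        · rw [if_pos hfe] at hx
          have hxv : x = e := (Option.some.inj hx).symm
          rw [hxv, hfe]
          refine ⟨?_, Or.inr (le_refl _), le_trans ho0val hval_e, he_rest⟩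
          rw [pvRepOf_all_le (reps ++ [e]) e h2' h1' h5', List.getLast_concat]
        · rw [if_neg hfe] at hx
          obtain ⟨ha, hb, hcnd, hd⟩ := h8 f x hx
          have hfle : f ≤ e := hd e List.mem_cons_self
          have hflt : f < e := lt_of_le_of_ne hfle hfe
          refine ⟨?_, Or.inr hfle, hcnd, fun e' he' => hd e' (List.mem_cons_of_mem e he')⟩
          rw [ha]
          exact (pvRepOf_append_gt reps e f h2' h1 (by rw [hheado0]; exact hcnd) hflt).symm
      obtain ⟨P1, P2, P3⟩ := ih e (lu.insert e e) (reps ++ [e]) h1' h2' h3' h4' h5' hrest_pw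
        he_rest h8'
      refine ⟨P1, ?_, fun f hf => P3 f (by
        obtain ⟨x, hx⟩ := hf
        by_cases hfe : f = e
        · exact ⟨e, by rw [PySem.Dict.get?_insert, if_pos hfe]⟩
        · exact ⟨x, by rw [PySem.Dict.get?_insert, if_neg hfe]; exact hx⟩)⟩
      intro f hf
      rcases List.mem_cons.mp hf with hfe | hfr
      · rw [hfe]
        exact P3 e ⟨e, PySem.Dict.get?_insert_self lu e e⟩
      · exact P2 f hfr

-- ===== VERDICT (by name: the statement is the Claim_ definition above) =====
theorem normalize_freqs_spec : Claim_equal_normalize_freqs := by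
  intro freqs threshold hdom hpre
  unfold Spec_normalize_freqs
  have hne : PySem.List.sorted freqs (fun x => x) false ≠ [] := by
    intro h
    apply hpre
    have hp := PySem.List.sorted_perm freqs (fun x => x) false
    rw [h] at hp
    exact hp.symm.eq_nil
  obtain ⟨o0, tl, hcons⟩ : ∃ o0 tl, PySem.List.sorted freqs (fun x => x) false = o0 :: tl := by
    cases h : PySem.List.sorted freqs (fun x => x) false with
    | nil => exact absurd h hne
    | cons a l => exact ⟨a, l, rfl⟩
  have hpw : (o0 :: tl).Pairwise (· ≤ ·) := by
    have := PySem.List.sorted_pairwise freqs (fun x => x)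
    rw [hcons] at this
    exact this
  simp only [normalize_freqs, normalize_freqs_alt, hcons, PySem.List.pyGetD_zero_cons]
  obtain ⟨P1, P2, _⟩ := pv_main_inv threshold o0 (o0 :: tl) o0 PySem.Dict.empty [o0]
    (by simp) (List.pairwise_singleton _ _) rfl rfl (by simp)
    hpw
    (by
      intro e he
      rcases List.mem_cons.mp he with h | h
      · exact le_of_eq h.symm
      · exact (List.pairwise_cons.mp hpw).1 e h)
    (by intro f x hx; rw [PySem.Dict.get?_empty] at hx; exact absurd hx (by simp))
  apply List.map_congr_left
  intro f hf
  have hford : f ∈ o0 :: tl := by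
    rw [← hcons, PySem.List.mem_sorted]
    exact hf
  obtain ⟨x, hx⟩ := P2 f hford
  rw [hx, P1 f x hx]
  rfl
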